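-- pv_equiv track=rewrite | github.com/FCChinen/sw-rune-study | post_analysis.py | check_qty
-- ===== SOURCE A (Python) =====
-- def check_qty(rune: dict, stat_list: list, max_qty: int):
--     qty = 0
--     has = []
--     for stat in stat_list:
--         exist = rune.get(stat) or rune.get(stat+"I")
--         if exist:
--             qty += 1
--             has.append(stat)
--
--     if qty <= max_qty:
--         return [rune for rune in stat_list if rune not in has]
--     return []
-- ===== SOURCE B (Python) =====
-- def check_qty(rune: dict, stat_list: list, max_qty: int):
--     # Budget-consuming single pass: each present stat spends one unit of the
--     # max_qty budget; exhausting it means qty would exceed max_qty, so return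
--     # [] immediately. Absent stats are collected directly (no counter, no
--     # `has` list, no quadratic `not in` filter).
--     if max_qty < 0:
--         return []
--     budget = max_qty
--     absent = []
--     for s in stat_list:
--         if rune.get(s) or rune.get(s + "I"):
--             if budget <= 0:
--                 return []
--             budget -= 1
--         else:
--             absent.append(s)
--     return absent
-- ===== Notes on version B (the rewrite author's own statement) =====
-- stated objective: faster
-- what changed: Replaces the count-then-quadratic-`not in has` filter with a budget-consuming single pass: each present stat spends one unit of max_qty budget, exceeding it returns [] early, otherwise absent stats are collected directly in the same pass.
import Mathlib
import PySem

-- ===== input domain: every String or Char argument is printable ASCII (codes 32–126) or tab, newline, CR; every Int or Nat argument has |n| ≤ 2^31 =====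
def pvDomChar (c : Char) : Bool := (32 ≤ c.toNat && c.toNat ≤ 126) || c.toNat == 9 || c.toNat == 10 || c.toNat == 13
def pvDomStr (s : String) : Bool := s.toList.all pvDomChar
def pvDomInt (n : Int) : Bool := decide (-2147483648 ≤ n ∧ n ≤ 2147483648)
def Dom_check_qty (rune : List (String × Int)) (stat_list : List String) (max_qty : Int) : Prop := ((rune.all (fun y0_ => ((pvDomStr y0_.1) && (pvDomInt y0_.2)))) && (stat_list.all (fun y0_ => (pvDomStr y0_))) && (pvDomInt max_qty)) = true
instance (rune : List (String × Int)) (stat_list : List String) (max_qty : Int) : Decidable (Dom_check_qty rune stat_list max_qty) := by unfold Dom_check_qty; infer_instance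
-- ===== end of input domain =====

-- B replaces A's count-then-`not in has` filter by a budget-consuming single pass (early return on exhaustion) collecting absent stats directly; same return value, measured faster.

-- ===== PORT A =====
-- Python truthiness of `rune.get(k)`: None and 0 are falsy.
def pvTruthy (o : Option Int) : Bool :=
  match o with
  | some v => v != 0
  | none => false

def check_qty (rune : List (String × Int)) (stat_list : List String) (max_qty : Int) : List String :=
  -- qty = 0; has = []; for stat in stat_list: exist = rune.get(stat) or rune.get(stat+"I"); if exist: qty += 1; has.append(stat)
  let st := stat_list.foldl (fun (acc : Int × List String) stat =>
    let exist := if pvTruthy (rune.lookup stat) then rune.lookup stat else rune.lookup (stat ++ "I")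
    if pvTruthy exist then (acc.1 + 1, acc.2 ++ [stat]) else acc) (0, [])
  if st.1 ≤ max_qty then stat_list.filter (fun s => !(st.2.contains s)) else []

-- ===== PORT B =====
-- the for-loop with early `return []`: structural recursion carrying (budget, absent);
-- none = the early return (budget exhausted on a present stat)
def check_qty_go (rune : List (String × Int)) : List String → Int → List String → Option (List String)
  | [], _, absent => some absent
  | s :: rest, budget, absent =>
    if pvTruthy (rune.lookup s) || pvTruthy (rune.lookup (s ++ "I")) then
      if budget ≤ 0 then none else check_qty_go rune rest (budget - 1) absent
    else
      check_qty_go rune rest budget (absent ++ [s])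

def check_qty_alt (rune : List (String × Int)) (stat_list : List String) (max_qty : Int) : List String :=
  if max_qty < 0 then []
  else
    match check_qty_go rune stat_list max_qty [] with
    | none => []
    | some absent => absent

-- ===== PRECONDITION & SPEC =====
def Spec_check_qty (rune : List (String × Int)) (stat_list : List String) (max_qty : Int) (out : List String) : Prop := out = check_qty_alt rune stat_list max_qty
instance (rune : List (String × Int)) (stat_list : List String) (max_qty : Int) (out : List String) : Decidable (Spec_check_qty rune stat_list max_qty out) := by unfold Spec_check_qty; infer_instance

-- ===== CLAIM (what is proved, stated in full; the proofs are below) =====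
def Claim_equal_check_qty : Prop := ∀ (rune : List (String × Int)) (stat_list : List String) (max_qty : Int), Dom_check_qty rune stat_list max_qty → Spec_check_qty rune stat_list max_qty (check_qty rune stat_list max_qty)

-- ===== LEMMAS AND PROOFS =====

-- the shared per-stat "present" test
def pvPresent (rune : List (String × Int)) (stat : String) : Bool :=
  pvTruthy (rune.lookup stat) || pvTruthy (rune.lookup (stat ++ "I"))

-- A's branch condition equals pvPresent
theorem pvExist_eq (rune : List (String × Int)) (stat : String) :
    pvTruthy (if pvTruthy (rune.lookup stat) then rune.lookup stat else rune.lookup (stat ++ "I"))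
      = pvPresent rune stat := by
  unfold pvPresent
  by_cases h : pvTruthy (rune.lookup stat) = true <;> simp [h]

theorem foldA_eq (rune : List (String × Int)) (l : List String) (q : Int) (h : List String) :
    l.foldl (fun (acc : Int × List String) stat =>
      let exist := if pvTruthy (rune.lookup stat) then rune.lookup stat else rune.lookup (stat ++ "I")
      if pvTruthy exist then (acc.1 + 1, acc.2 ++ [stat]) else acc) (q, h)
    = (q + ((l.filter (pvPresent rune)).length : Int), h ++ l.filter (pvPresent rune)) := by
  induction l generalizing q h with
  | nil => simp
  | cons a t ih =>
    rw [List.foldl_cons]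
    simp only [pvExist_eq rune a]
    by_cases hp : pvPresent rune a = true
    · simp only [hp, if_true, ih, List.filter_cons_of_pos hp]
      refine Prod.ext ?_ ?_
      · simp; omega
      · simp
    · simp only [hp, Bool.false_eq_true, if_false, ih, List.filter_cons_of_neg hp]

-- characterisation of B's recursion: with nonnegative budget it either collapses
-- (too many present stats) or returns exactly the absent stats
theorem go_eq (rune : List (String × Int)) (l : List String) (b : Int) (acc : List String) (hb : 0 ≤ b) :
    check_qty_go rune l b acc
      = if ((l.filter (pvPresent rune)).length : Int) ≤ b
        then some (acc ++ l.filter (fun s => !(pvPresent rune s)))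
        else none := by
  induction l generalizing b acc with
  | nil => simp [check_qty_go]; omega
  | cons a t ih =>
    rw [check_qty_go]
    by_cases hp : pvPresent rune a = true
    · have hb' : (pvTruthy (rune.lookup a) || pvTruthy (rune.lookup (a ++ "I"))) = true := hp
      simp only [hb', if_true, List.filter_cons, hp, Bool.not_true, Bool.false_eq_true,
        if_false, List.length_cons]
      by_cases hz : b ≤ 0
      · rw [if_pos hz, if_neg (by push_cast; omega)]
      · rw [if_neg hz, ih (b - 1) acc (by omega)]
        by_cases hc : ((t.filter (pvPresent rune)).length : Int) ≤ b - 1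
        · rw [if_pos hc, if_pos (by push_cast at hc ⊢; omega)]
        · rw [if_neg hc, if_neg (by push_cast at hc ⊢; omega)]
    · have hp' : pvPresent rune a = false := eq_false_of_ne_true hp
      have hb' : (pvTruthy (rune.lookup a) || pvTruthy (rune.lookup (a ++ "I"))) = false := hp'
      simp only [hb', Bool.false_eq_true, if_false, ih b (acc ++ [a]) hb, List.filter_cons, hp',
        Bool.not_false, if_true]
      by_cases hc : ((t.filter (pvPresent rune)).length : Int) ≤ b
      · simp [hc]
      · simp [hc]

-- for s ∈ l, membership in the present-filter equals presence
theorem contains_filter_present (rune : List (String × Int)) (l : List String) (s : String)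
    (hs : s ∈ l) : (l.filter (pvPresent rune)).contains s = pvPresent rune s := by
  by_cases hp : pvPresent rune s = true
  · simp [List.mem_filter, hs, hp]
  · simp [List.mem_filter, hp]

-- ===== VERDICT (by name: the statement is the Claim_ definition above) =====
theorem check_qty_spec : Claim_equal_check_qty := by
  intro rune stat_list max_qty _
  unfold Spec_check_qty check_qty check_qty_alt
  rw [foldA_eq]
  simp only [List.nil_append, zero_add]
  by_cases hneg : max_qty < 0
  · have hlen : (0:Int) ≤ ((stat_list.filter (pvPresent rune)).length : Int) := by positivity
    rw [if_pos hneg, if_neg (by omega)]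
  · rw [if_neg hneg, go_eq rune stat_list max_qty [] (by omega)]
    by_cases hq : ((stat_list.filter (pvPresent rune)).length : Int) ≤ max_qty
    · rw [if_pos hq, if_pos hq]
      apply List.filter_congr
      intro s hs
      rw [contains_filter_present rune stat_list s hs]
    · rw [if_neg hq, if_neg hq]
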